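-- pv_equiv track=rewrite | github.com/zplchn/m_amzn | reviewed/m.py | longest_substring_no_3_same_letters
-- ===== SOURCE A (Python) =====
-- def longest_substring_no_3_same_letters(str: str) -> str:
--     if len(str) < 3:
--         return str
--     res = ''
--     maxv = 0
--     cnt = 1
--     pre = 0
--     for i in range(1, len(str)):
--         if str[i] != str[i - 1]:
--             cnt = 1
--             if i - pre + 1 > maxv:
--                 maxv = i - pre + 1
--                 res = str[pre: i + 1]
--         elif cnt < 2:
--             cnt = 2
--             if i - pre + 1 > maxv:
--                 maxv = i - pre + 1
--                 res = str[pre: i + 1]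
--         else:
--             pre = i - 1
--     return res
-- ===== SOURCE B (Python) =====
-- def longest_substring_no_3_same_letters(str: str) -> str:
--     n = len(str)
--     if n < 3:
--         return str
--     # segment starts: 0, plus j-1 for every position j with three equal chars ending at j
--     starts = [0]
--     for j in range(2, n):
--         if str[j] == str[j - 1] == str[j - 2]:
--             starts.append(j - 1)
--     best = ''
--     best_len = 0
--     for k in range(len(starts)):
--         start = starts[k]
--         end = starts[k + 1] if k + 1 < len(starts) else n - 1
--         if end - start + 1 > best_len:
--             best_len = end - start + 1
--             best = str[start:end + 1]
--     return best
-- ===== Notes on version B (the rewrite author's own statement) =====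
-- stated objective: alternative
-- what changed: Replaces A's on-line sliding window (one pass carrying res/maxv/cnt/pre) by a two-phase scan: first collect every triple-repeat break position into a segment-start list, then pick the first strictly-longest segment between consecutive breaks.
import Mathlib
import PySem

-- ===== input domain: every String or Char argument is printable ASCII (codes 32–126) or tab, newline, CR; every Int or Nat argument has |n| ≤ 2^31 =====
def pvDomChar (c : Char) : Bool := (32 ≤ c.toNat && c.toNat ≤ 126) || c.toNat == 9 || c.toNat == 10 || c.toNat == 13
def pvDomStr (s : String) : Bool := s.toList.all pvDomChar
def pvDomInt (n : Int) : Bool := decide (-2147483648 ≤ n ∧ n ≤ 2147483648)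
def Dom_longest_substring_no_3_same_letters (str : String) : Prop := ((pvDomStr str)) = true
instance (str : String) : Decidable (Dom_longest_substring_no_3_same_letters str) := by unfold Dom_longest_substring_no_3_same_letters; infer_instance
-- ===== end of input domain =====

-- B replaces A's on-line sliding window by a two-phase scan (collect all triple-repeat break
-- positions, then pick the first strictly-longest segment); objective: alternative algorithm, same value.

-- ===== PORT A =====
def longest_substring_no_3_same_letters (str : String) : String :=
  if PySem.Str.len str < 3 then str
  else
    let st := (PySem.List.pyRange 1 (PySem.Str.len str) 1).foldl
      (fun (st : String × Int × Int × Int) i =>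
        let res := st.1; let maxv := st.2.1; let cnt := st.2.2.1; let pre := st.2.2.2
        if PySem.Str.pyGet? str i ≠ PySem.Str.pyGet? str (i - 1) then
          if i - pre + 1 > maxv then
            (PySem.Str.slice str (some pre) (some (i + 1)), i - pre + 1, 1, pre)
          else (res, maxv, 1, pre)
        else if cnt < 2 then
          if i - pre + 1 > maxv then
            (PySem.Str.slice str (some pre) (some (i + 1)), i - pre + 1, 2, pre)
          else (res, maxv, 2, pre)
        else (res, maxv, cnt, i - 1))
      ("", 0, 1, 0)
    st.1

-- ===== PORT B =====
def longest_substring_no_3_same_letters_alt (str : String) : String :=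
  let n := PySem.Str.len str
  if n < 3 then str
  else
    let starts := (PySem.List.pyRange 2 n 1).foldl
      (fun (starts : List Int) j =>
        if PySem.Str.pyGet? str j = PySem.Str.pyGet? str (j - 1) ∧
           PySem.Str.pyGet? str (j - 1) = PySem.Str.pyGet? str (j - 2) then
          starts ++ [j - 1]
        else starts) [0]
    let r := (PySem.List.pyRange 0 (PySem.List.len starts) 1).foldl
      (fun (acc : String × Int) k =>
        let start := PySem.List.pyGetD starts k 0
        let e := if k + 1 < PySem.List.len starts then PySem.List.pyGetD starts (k + 1) 0 else n - 1
        if e - start + 1 > acc.2 then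
          (PySem.Str.slice str (some start) (some (e + 1)), e - start + 1)
        else acc) ("", 0)
    r.1

-- ===== PRECONDITION & SPEC =====
def Spec_longest_substring_no_3_same_letters (str : String) (out : String) : Prop := out = longest_substring_no_3_same_letters_alt str
instance (str : String) (out : String) : Decidable (Spec_longest_substring_no_3_same_letters str out) := by unfold Spec_longest_substring_no_3_same_letters; infer_instance

-- ===== CLAIM (what is proved, stated in full; the proofs are below) =====
def Claim_equal_longest_substring_no_3_same_letters : Prop := ∀ (str : String), Dom_longest_substring_no_3_same_letters str → Spec_longest_substring_no_3_same_letters str (longest_substring_no_3_same_letters str)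

-- ===== LEMMAS AND PROOFS =====

-- A's loop step and its fold over the first m indices
def pvAStep (str : String) (st : String × Int × Int × Int) (i : Int) : String × Int × Int × Int :=
  let res := st.1; let maxv := st.2.1; let cnt := st.2.2.1; let pre := st.2.2.2
  if PySem.Str.pyGet? str i ≠ PySem.Str.pyGet? str (i - 1) then
    if i - pre + 1 > maxv then
      (PySem.Str.slice str (some pre) (some (i + 1)), i - pre + 1, 1, pre)
    else (res, maxv, 1, pre)
  else if cnt < 2 then
    if i - pre + 1 > maxv then
      (PySem.Str.slice str (some pre) (some (i + 1)), i - pre + 1, 2, pre)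
    else (res, maxv, 2, pre)
  else (res, maxv, cnt, i - 1)

def pvAFold (str : String) (m : Int) : String × Int × Int × Int :=
  (PySem.List.pyRange 1 m 1).foldl (pvAStep str) ("", 0, 1, 0)

-- B's first loop (segment starts) over the first m indices
def pvStarts (str : String) (m : Int) : List Int :=
  (PySem.List.pyRange 2 m 1).foldl
    (fun (starts : List Int) j =>
      if PySem.Str.pyGet? str j = PySem.Str.pyGet? str (j - 1) ∧
         PySem.Str.pyGet? str (j - 1) = PySem.Str.pyGet? str (j - 2) then
        starts ++ [j - 1]
      else starts) [0]

-- B's selection loop, with the default end d (Source B uses d = n - 1)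
def pvUpd (str : String) (acc : String × Int) (p e : Int) : String × Int :=
  if e - p + 1 > acc.2 then (PySem.Str.slice str (some p) (some (e + 1)), e - p + 1) else acc

def pvSelBody (str : String) (S : List Int) (d : Int) (acc : String × Int) (k : Int) : String × Int :=
  let start := PySem.List.pyGetD S k 0
  let e := if k + 1 < PySem.List.len S then PySem.List.pyGetD S (k + 1) 0 else d
  if e - start + 1 > acc.2 then
    (PySem.Str.slice str (some start) (some (e + 1)), e - start + 1)
  else acc

def pvSel (str : String) (S : List Int) (d : Int) : String × Int :=
  (PySem.List.pyRange 0 (PySem.List.len S) 1).foldl (pvSelBody str S d) ("", 0)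

def pvSelHead (str : String) (S : List Int) (d : Int) : String × Int :=
  (PySem.List.pyRange 0 (PySem.List.len S - 1) 1).foldl (pvSelBody str S d) ("", 0)

theorem pvSelBody_eq (str : String) (S : List Int) (d : Int) (acc : String × Int) (k : Int) :
    pvSelBody str S d acc k
      = pvUpd str acc (PySem.List.pyGetD S k 0)
          (if k + 1 < PySem.List.len S then PySem.List.pyGetD S (k + 1) 0 else d) := rfl

theorem pvUpd_succ (str : String) (h : String × Int) (p e : Int) :
    pvUpd str (pvUpd str h p (e - 1)) p e = pvUpd str h p e := by
  unfold pvUpd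
  split_ifs with h1 h2 h3 h3 <;> simp_all; omega

theorem pvSelHead_congr (str : String) (S : List Int) (d d' : Int) :
    pvSelHead str S d = pvSelHead str S d' := by
  unfold pvSelHead
  apply PySem.List.foldl_congr_mem
  intro acc k hk
  rw [PySem.List.mem_pyRange_one] at hk
  rw [pvSelBody_eq, pvSelBody_eq, if_pos (by omega), if_pos (by omega)]

theorem pvSel_eq (str : String) (init : List Int) (p d : Int) :
    pvSel str (init ++ [p]) d = pvUpd str (pvSelHead str (init ++ [p]) d) p d := by
  unfold pvSel pvSelHead
  have hlen : PySem.List.len (init ++ [p]) = (init.length : Int) + 1 := by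
    simp [PySem.List.len_eq]
  rw [hlen]
  rw [PySem.List.pyRange_one_succ_right (by positivity)]
  rw [List.foldl_append]
  have h1 : ((init.length : Int) + 1) - 1 = (init.length : Int) := by omega
  rw [h1]
  simp only [List.foldl_cons, List.foldl_nil]
  rw [pvSelBody_eq, hlen, if_neg (by omega)]
  congr 1
  rw [PySem.List.pyGetD_eq_getElem _ 0 (by positivity) (by simp)]
  simp

theorem pvSelHead_append (str : String) (init : List Int) (p x d : Int) :
    pvSelHead str ((init ++ [p]) ++ [x]) d = pvSel str (init ++ [p]) x := by
  unfold pvSelHead pvSel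
  have hlen1 : PySem.List.len ((init ++ [p]) ++ [x]) = (init.length : Int) + 2 := by
    simp [PySem.List.len_eq]
  have hlen2 : PySem.List.len (init ++ [p]) = (init.length : Int) + 1 := by
    simp [PySem.List.len_eq]
  rw [hlen1, hlen2]
  have h1 : ((init.length : Int) + 2) - 1 = (init.length : Int) + 1 := by omega
  rw [h1]
  apply PySem.List.foldl_congr_mem
  intro acc k hk
  rw [PySem.List.mem_pyRange_one] at hk
  rw [pvSelBody_eq, pvSelBody_eq, hlen1, hlen2, if_pos (by omega)]
  have hk0 : 0 ≤ k := hk.1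
  have hget : ∀ (j : Int), 0 ≤ j → j < (init.length : Int) + 1 →
      PySem.List.pyGetD ((init ++ [p]) ++ [x]) j 0 = PySem.List.pyGetD (init ++ [p]) j 0 := by
    intro j hj0 hj1
    rw [PySem.List.pyGetD_eq_getElem _ 0 hj0 (by simp; omega),
        PySem.List.pyGetD_eq_getElem _ 0 hj0 (by simp; omega)]
    rw [List.getElem_append_left (by simp; omega)]
  rw [hget k hk0 (by omega)]
  by_cases hk1 : k + 1 < (init.length : Int) + 1
  · rw [if_pos hk1, hget (k + 1) (by omega) (by omega)]
  · rw [if_neg hk1]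
    have hke : k = (init.length : Int) := by omega
    have : PySem.List.pyGetD ((init ++ [p]) ++ [x]) (k + 1) 0 = x := by
      rw [PySem.List.pyGetD_eq_getElem _ 0 (by omega) (by simp; omega)]
      have : (k + 1).toNat = init.length + 1 := by omega
      simp [this]
    rw [this]

-- pvUpd never decreases the recorded length
theorem pvUpd_le (str : String) (acc : String × Int) (p e : Int) :
    acc.2 ≤ (pvUpd str acc p e).2 := by
  unfold pvUpd; split_ifs with h
  · show acc.2 ≤ e - p + 1
    omega
  · exact le_rfl

-- the main invariant relating A's loop state after m steps to B's two phases on the first m chars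
theorem pvInv (str : String) (m : Nat) (h2 : 2 ≤ m) (hn : (m : Int) ≤ PySem.Str.len str) :
    ∃ (init : List Int) (res : String) (maxv cnt pre : Int),
      pvAFold str m = (res, maxv, cnt, pre) ∧
      pvStarts str m = init ++ [pre] ∧
      (res, maxv) = pvSel str (pvStarts str m) ((m : Int) - 1) ∧
      2 ≤ maxv ∧
      cnt = (if PySem.Str.pyGet? str ((m : Int) - 1) = PySem.Str.pyGet? str ((m : Int) - 2)
             then 2 else 1) := by
  induction m, h2 using Nat.le_induction with
  | base =>
    have c2 : ((2 : Nat) : Int) = 2 := by norm_num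
    rw [c2]
    have hsel : pvSel str [(0 : Int)] (2 - 1) = (PySem.Str.slice str (some 0) (some 2), 2) := by
      unfold pvSel
      have h1 : PySem.List.len [(0 : Int)] = 1 := by decide
      have hx : PySem.List.pyRange 0 1 = [0] := by decide
      rw [h1, hx]
      simp only [List.foldl_cons, List.foldl_nil]
      rw [pvSelBody_eq, h1]
      norm_num [PySem.List.pyGetD_zero_cons, pvUpd]
    have hst : pvStarts str 2 = [0] := by
      unfold pvStarts
      have : PySem.List.pyRange 2 2 = [] := by decide
      rw [this]; rfl
    have hfold : pvAFold str 2 = pvAStep str ("", 0, 1, 0) 1 := by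
      unfold pvAFold
      have : PySem.List.pyRange 1 2 = [1] := by decide
      rw [this]; rfl
    refine ⟨[], PySem.Str.slice str (some 0) (some 2), 2,
      (if PySem.Str.pyGet? str 1 = PySem.Str.pyGet? str 0 then 2 else 1), 0,
      ?_, by rw [hst]; rfl, by rw [hst]; exact hsel.symm, by norm_num, by norm_num⟩
    rw [hfold]
    simp only [pvAStep]
    norm_num
    split_ifs <;> rfl
  | succ m h2 IH =>
    have hm : (m : Int) ≤ PySem.Str.len str := by push_cast at hn ⊢; omega
    obtain ⟨init, res, maxv, cnt, pre, hA, hS, hsel, hmax, hcnt⟩ := IH hm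
    have e1 : (((m + 1 : Nat)) : Int) - 1 = (m : Int) := by push_cast; omega
    have e2 : (((m + 1 : Nat)) : Int) - 2 = (m : Int) - 1 := by push_cast; omega
    have hAF : pvAFold str ((m + 1 : Nat)) = pvAStep str (pvAFold str m) (m : Int) := by
      unfold pvAFold
      push_cast
      rw [PySem.List.pyRange_one_succ_right (by omega), List.foldl_append]
      rfl
    have hSF : pvStarts str ((m + 1 : Nat)) =
        (if PySem.Str.pyGet? str (m : Int) = PySem.Str.pyGet? str ((m : Int) - 1) ∧
            PySem.Str.pyGet? str ((m : Int) - 1) = PySem.Str.pyGet? str ((m : Int) - 2) then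
          pvStarts str m ++ [(m : Int) - 1] else pvStarts str m) := by
      unfold pvStarts
      push_cast
      rw [PySem.List.pyRange_one_succ_right (by omega), List.foldl_append]
      rfl
    rw [e1, e2, hAF, hA]
    by_cases hb : PySem.Str.pyGet? str (m : Int) = PySem.Str.pyGet? str ((m : Int) - 1) ∧
        PySem.Str.pyGet? str ((m : Int) - 1) = PySem.Str.pyGet? str ((m : Int) - 2)
    · -- triple repeat ending at m: A resets the window, B records a new segment start
      have hc2 : cnt = 2 := by rw [hcnt, if_pos hb.2]
      have hstep : pvAStep str (res, maxv, cnt, pre) (m : Int) = (res, maxv, cnt, (m : Int) - 1) := by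
        simp only [pvAStep]
        rw [if_neg (not_not_intro hb.1), if_neg (by omega)]
      have hS' : pvStarts str ((m + 1 : Nat)) = (init ++ [pre]) ++ [(m : Int) - 1] := by
        rw [hSF, if_pos hb, hS]
      refine ⟨init ++ [pre], res, maxv, cnt, (m : Int) - 1, hstep, hS', ?_, hmax, ?_⟩
      · rw [hS']
        rw [pvSel_eq str (init ++ [pre]) ((m : Int) - 1) (m : Int)]
        rw [pvSelHead_append]
        rw [← hS, ← hsel]
        unfold pvUpd
        split_ifs with h
        · exfalso
          simp only [] at h
          omega
        · rfl
      · rw [hc2, if_pos hb.1]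
    · -- no triple repeat at m: both sides extend the current segment by one
      have hupd : ∀ c' : Int, (if (m : Int) - pre + 1 > maxv then
            (PySem.Str.slice str (some pre) (some ((m : Int) + 1)), (m : Int) - pre + 1, c', pre)
          else (res, maxv, c', pre))
          = ((pvUpd str (res, maxv) pre (m : Int)).1, (pvUpd str (res, maxv) pre (m : Int)).2, c', pre) := by
        intro c'; unfold pvUpd
        split_ifs <;> simp
      have hsel' : (pvUpd str (res, maxv) pre (m : Int)) = pvSel str (pvStarts str m) (m : Int) := by
        rw [hsel]
        rw [hS, pvSel_eq str init pre ((m : Int) - 1), pvSel_eq str init pre (m : Int)]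
        rw [pvSelHead_congr str (init ++ [pre]) ((m : Int) - 1) (m : Int)]
        exact pvUpd_succ str (pvSelHead str (init ++ [pre]) (m : Int)) pre (m : Int)
      have hmax' : 2 ≤ (pvUpd str (res, maxv) pre (m : Int)).2 := by
        have := pvUpd_le str (res, maxv) pre (m : Int)
        simp at this; omega
      have hS' : pvStarts str ((m + 1 : Nat)) = init ++ [pre] := by
        rw [hSF, if_neg hb, hS]
      refine ⟨init, (pvUpd str (res, maxv) pre (m : Int)).1, (pvUpd str (res, maxv) pre (m : Int)).2,
        (if PySem.Str.pyGet? str (m : Int) = PySem.Str.pyGet? str ((m : Int) - 1) then 2 else 1),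
        pre, ?_, hS', by rw [hS', ← hS, ← hsel'], hmax', rfl⟩
      by_cases hq : PySem.Str.pyGet? str (m : Int) = PySem.Str.pyGet? str ((m : Int) - 1)
      · -- equal to previous char, but no triple: the elif branch, cnt becomes 2
        have hq2 : ¬ PySem.Str.pyGet? str ((m : Int) - 1) = PySem.Str.pyGet? str ((m : Int) - 2) := by
          intro h; exact hb ⟨hq, h⟩
        have hc1 : cnt = 1 := by rw [hcnt, if_neg hq2]
        simp only [pvAStep]
        rw [if_neg (not_not_intro hq), if_pos (by omega), hupd 2, if_pos hq]
      · -- different char: the first branch, cnt becomes 1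
        simp only [pvAStep]
        rw [if_pos hq, hupd 1, if_neg hq]

-- the ports, unfolded past the n < 3 test
theorem portA_eq (str : String) (h3 : ¬ PySem.Str.len str < 3) :
    longest_substring_no_3_same_letters str = (pvAFold str (PySem.Str.len str)).1 := by
  simp only [longest_substring_no_3_same_letters]
  rw [if_neg h3]
  rfl

theorem portB_eq (str : String) (h3 : ¬ PySem.Str.len str < 3) :
    longest_substring_no_3_same_letters_alt str
      = (pvSel str (pvStarts str (PySem.Str.len str)) (PySem.Str.len str - 1)).1 := by
  simp only [longest_substring_no_3_same_letters_alt]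
  rw [if_neg h3]
  rfl

-- ===== VERDICT (by name: the statement is the Claim_ definition above) =====
theorem longest_substring_no_3_same_letters_spec : Claim_equal_longest_substring_no_3_same_letters := by
  intro str _
  unfold Spec_longest_substring_no_3_same_letters
  by_cases h3 : PySem.Str.len str < 3
  · simp only [longest_substring_no_3_same_letters, longest_substring_no_3_same_letters_alt]
    rw [if_pos h3, if_pos h3]
  · have hlen0 : PySem.Str.len str = ((PySem.Str.len str).toNat : Int) := by
      have : PySem.Str.len str = (str.toList.length : Int) := by simp [PySem.Str.len_eq]
      omega
    obtain ⟨init, res, maxv, cnt, pre, hA, hS, hsel, hmax, hcnt⟩ :=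
      pvInv str (PySem.Str.len str).toNat (by omega) (by omega)
    rw [portA_eq str h3, portB_eq str h3, hlen0, hA]
    have : (res, maxv).1 = (pvSel str (pvStarts str ((PySem.Str.len str).toNat : Int))
        (((PySem.Str.len str).toNat : Int) - 1)).1 := by rw [hsel]
    exact this
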